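-- pv_equiv track=rewrite | github.com/PierreSavatte/adventofcode | _2023/day14/__init__.py | compute_most_north_position
-- ===== SOURCE A (Python) =====
-- Position = tuple[int, int]
--
-- Tiles = list[list[str]]
--
-- def get_tile_at_position(tiles: Tiles, position: Position) -> str:
--     x, y = position
--     return tiles[y][x]
--
-- def compute_most_north_position(
--     tiles: Tiles, rounded_rock_position: Position
-- ) -> Position:
--     rock_x, rock_y = rounded_rock_position
--     min_y = rock_y
--     for y in range(rock_y, -1, -1):
--         min_y = y
--         if y == 0:
--             continue
--         tile_above = get_tile_at_position(
--             tiles=tiles, position=(rock_x, y - 1)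
--         )
--         if tile_above == "#" or tile_above == "O":
--             break
--     return rock_x, min_y
-- ===== SOURCE B (Python) =====
-- def compute_most_north_position(tiles, rounded_rock_position):
--     rock_x, rock_y = rounded_rock_position
--     # a rock at or above the top row stays where it is
--     dest = rock_y if rock_y <= 0 else 0
--     for y in range(rock_y):
--         if tiles[y][rock_x] in ("#", "O"):
--             dest = y + 1
--     return rock_x, dest
-- ===== Notes on version B (the rewrite author's own statement) =====
-- stated objective: alternative
-- what changed: B replaces A's downward walk with early break from the rock by a single forward top-down scan of the rows above the rock that keeps the destination row just below the last blocking tile seen.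
-- outside the precondition, e.g. on compute_most_north_position([[], ['#']], (0, 2)): A returns (0, 2), B raises IndexError
import Mathlib
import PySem

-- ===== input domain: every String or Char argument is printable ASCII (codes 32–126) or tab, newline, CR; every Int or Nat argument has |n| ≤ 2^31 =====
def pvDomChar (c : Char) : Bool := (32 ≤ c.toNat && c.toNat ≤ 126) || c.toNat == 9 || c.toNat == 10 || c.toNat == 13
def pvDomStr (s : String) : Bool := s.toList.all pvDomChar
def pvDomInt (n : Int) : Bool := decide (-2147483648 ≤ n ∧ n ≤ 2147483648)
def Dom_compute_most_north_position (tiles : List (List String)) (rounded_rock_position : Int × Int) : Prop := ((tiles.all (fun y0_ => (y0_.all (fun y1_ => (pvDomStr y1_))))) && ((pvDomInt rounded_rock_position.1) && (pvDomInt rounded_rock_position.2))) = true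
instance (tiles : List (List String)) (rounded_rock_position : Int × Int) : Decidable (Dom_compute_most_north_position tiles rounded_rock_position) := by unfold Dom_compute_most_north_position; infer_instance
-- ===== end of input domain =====

-- B replaces A's downward walk (with early break) from the rock by a single forward
-- top-down scan of the rows above the rock keeping the last blocking row seen; same cost.

-- ===== PORT A =====
-- tiles[y][x]; out-of-range (IndexError in Python) is excluded by Pre_, the default "" is never used there
def get_tile_at_position (tiles : List (List String)) (position : Int × Int) : String :=
  (PySem.List.pyGet? ((PySem.List.pyGet? tiles position.2).getD []) position.1).getD ""

-- A's `for y in range(rock_y, -1, -1)` loop with its break/continue, state = min_y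
def pvALoop (tiles : List (List String)) (rock_x : Int) : List Int → Int → Int
  | [], min_y => min_y
  | y :: rest, _ =>
    if y = 0 then pvALoop tiles rock_x rest y
    else
      let tile_above := get_tile_at_position tiles (rock_x, y - 1)
      if tile_above = "#" ∨ tile_above = "O" then y
      else pvALoop tiles rock_x rest y

def compute_most_north_position (tiles : List (List String)) (rounded_rock_position : Int × Int) : Int × Int :=
  let rock_x := rounded_rock_position.1
  let rock_y := rounded_rock_position.2
  (rock_x, pvALoop tiles rock_x (PySem.List.pyRange rock_y (-1) (-1)) rock_y)

-- ===== PORT B =====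
def compute_most_north_position_alt (tiles : List (List String)) (rounded_rock_position : Int × Int) : Int × Int :=
  let rock_x := rounded_rock_position.1
  let rock_y := rounded_rock_position.2
  let dest := (PySem.List.pyRange 0 rock_y 1).foldl
    (fun dest y =>
      let t := (PySem.List.pyGet? ((PySem.List.pyGet? tiles y).getD []) rock_x).getD ""
      if t = "#" ∨ t = "O" then y + 1 else dest)
    (if rock_y ≤ 0 then rock_y else 0)
  (rock_x, dest)

-- ===== PRECONDITION & SPEC =====
-- Pre_ excludes inputs where either program raises an IndexError: a rock row beyond the grid,
-- and ragged grids where some row strictly above the rock lacks column rock_x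
-- (B scans every such row and raises; A may return if it breaks at an obstacle first).
def Pre_compute_most_north_position (tiles : List (List String)) (rounded_rock_position : Int × Int) : Prop :=
  rounded_rock_position.2 ≤ (tiles.length : Int) ∧
  ∀ row ∈ tiles.take rounded_rock_position.2.toNat,
    -(row.length : Int) ≤ rounded_rock_position.1 ∧ rounded_rock_position.1 < (row.length : Int)

instance (tiles : List (List String)) (rounded_rock_position : Int × Int) : Decidable (Pre_compute_most_north_position tiles rounded_rock_position) := by unfold Pre_compute_most_north_position; infer_instance

def pvWitness_compute_most_north_position : List (List String) × (Int × Int) := ([["O"], ["."]], (0, 2))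

def Spec_compute_most_north_position (tiles : List (List String)) (rounded_rock_position : Int × Int) (out : Int × Int) : Prop := out = compute_most_north_position_alt tiles rounded_rock_position
instance (tiles : List (List String)) (rounded_rock_position : Int × Int) (out : Int × Int) : Decidable (Spec_compute_most_north_position tiles rounded_rock_position out) := by unfold Spec_compute_most_north_position; infer_instance

-- ===== CLAIM (what is proved, stated in full; the proofs are below) =====
def Claim_equal_compute_most_north_position : Prop := ∀ (tiles : List (List String)) (rounded_rock_position : Int × Int), Dom_compute_most_north_position tiles rounded_rock_position → Pre_compute_most_north_position tiles rounded_rock_position → Spec_compute_most_north_position tiles rounded_rock_position (compute_most_north_position tiles rounded_rock_position)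

-- ===== LEMMAS AND PROOFS =====

-- A's descending loop equals B's forward fold plus one, for any nonnegative start row;
-- the initial min_y is irrelevant because the range [n, …, 0] is nonempty.
theorem pvALoop_eq_fold (tiles : List (List String)) (x : Int) (n : Nat) (m : Int) :
    pvALoop tiles x (PySem.List.pyRange (n : Int) (-1) (-1)) m
      = (PySem.List.pyRange 0 (n : Int) 1).foldl
          (fun dest y =>
            let t := (PySem.List.pyGet? ((PySem.List.pyGet? tiles y).getD []) x).getD ""
            if t = "#" ∨ t = "O" then y + 1 else dest) 0 := by
  induction n generalizing m with
  | zero =>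
      rw [show ((0 : Nat) : Int) = 0 by norm_num,
        PySem.List.pyRange_neg_one_cons (by norm_num : (-1 : Int) < 0),
        PySem.List.pyRange_neg_one_eq_nil (by norm_num : (0 : Int) - 1 ≤ -1),
        PySem.List.pyRange_one_eq_nil (by norm_num : (0 : Int) ≤ 0)]
      simp [pvALoop]
  | succ n ih =>
      have hcast : ((n + 1 : Nat) : Int) = (n : Int) + 1 := by push_cast; ring
      rw [hcast,
        PySem.List.pyRange_neg_one_cons (by omega : (-1 : Int) < (n : Int) + 1),
        PySem.List.pyRange_one_succ_right (by omega : (0 : Int) ≤ (n : Int))]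
      have hne : ¬ ((n : Int) + 1 = 0) := by omega
      have hsub : ((n : Int) + 1) - 1 = (n : Int) := by ring
      simp only [pvALoop, if_neg hne, hsub, List.foldl_append, List.foldl_cons, List.foldl_nil,
        get_tile_at_position]
      split
      · rfl
      · exact ih ((n : Int) + 1)

-- ===== VERDICT (by name: the statement is the Claim_ definition above) =====
theorem compute_most_north_position_spec : Claim_equal_compute_most_north_position := by
  intro tiles p _hdom _hpre
  unfold Spec_compute_most_north_position
  by_cases hy : 0 ≤ p.2
  · have hcast : ((p.2.toNat : Nat) : Int) = p.2 := Int.toNat_of_nonneg hy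
    have key := pvALoop_eq_fold tiles p.1 p.2.toNat p.2
    rw [hcast] at key
    simp only [compute_most_north_position, compute_most_north_position_alt, key]
    rcases lt_or_eq_of_le hy with h | h
    · rw [if_neg (by omega)]
    · rw [← h]; simp
  · -- rock_y < 0: both ranges are empty; A keeps min_y = rock_y, B's dest starts at rock_y
    simp only [compute_most_north_position, compute_most_north_position_alt,
      PySem.List.pyRange_neg_one_eq_nil (by omega : p.2 ≤ -1),
      PySem.List.pyRange_one_eq_nil (by omega : p.2 ≤ 0),
      if_pos (by omega : p.2 ≤ 0), List.foldl_nil, pvALoop]
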